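-- pv_equiv track=rewrite | github.com/Catary369/MinTic | Codigos Phyton/mintic_reto_5.py | miequipo
-- ===== SOURCE A (Python) =====
-- def miequipo(posiciones_j, equipos_j, nombre_e):
--   posiciones = []
--   for posicion in posiciones_j:
--     for equipo in range(len(equipos_j)):
--       e_ = equipos_j[equipo]
--       if nombre_e == e_ and equipo == posicion:
--         posiciones.append(posicion)
--   return posiciones
-- ===== SOURCE B (Python) =====
-- def miequipo(posiciones_j, equipos_j, nombre_e):
--     indices = [i for i, e in enumerate(equipos_j) if e == nombre_e]
--     return [p for p in posiciones_j if p in indices]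
-- ===== Notes on version B (the rewrite author's own statement) =====
-- stated objective: faster
-- what changed: Replaces the nested scan (a full index scan of equipos_j for every position) with two sequential passes: one enumerate pass builds the index table of matching team slots, then a filter pass keeps positions found in that table.
import Mathlib
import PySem

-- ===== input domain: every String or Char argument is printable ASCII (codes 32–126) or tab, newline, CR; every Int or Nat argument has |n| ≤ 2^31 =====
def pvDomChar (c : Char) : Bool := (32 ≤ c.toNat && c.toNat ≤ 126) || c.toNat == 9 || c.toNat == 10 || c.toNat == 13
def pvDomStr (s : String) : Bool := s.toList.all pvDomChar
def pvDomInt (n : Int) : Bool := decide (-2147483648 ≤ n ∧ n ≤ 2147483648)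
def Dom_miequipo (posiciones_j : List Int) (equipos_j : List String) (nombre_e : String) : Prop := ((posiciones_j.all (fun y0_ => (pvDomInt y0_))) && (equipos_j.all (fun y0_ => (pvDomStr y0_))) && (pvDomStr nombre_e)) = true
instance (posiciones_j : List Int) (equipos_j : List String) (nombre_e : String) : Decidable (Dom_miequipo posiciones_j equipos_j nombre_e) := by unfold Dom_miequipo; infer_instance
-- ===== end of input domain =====

-- B replaces A's nested scan by two sequential passes (index table, then filter); return-value equivalence.

-- ===== PORT A =====
def miequipo (posiciones_j : List Int) (equipos_j : List String) (nombre_e : String) : List Int :=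
  posiciones_j.foldl (fun posiciones posicion =>
    (PySem.List.pyRange 0 equipos_j.length 1).foldl (fun posiciones equipo =>
      let e_ := PySem.List.pyGetD equipos_j equipo ""   -- index from range(len), always in range
      if nombre_e == e_ && equipo == posicion then posiciones ++ [posicion] else posiciones)
      posiciones) []

-- ===== PORT B =====
def miequipo_alt (posiciones_j : List Int) (equipos_j : List String) (nombre_e : String) : List Int :=
  let indices := (PySem.List.enumerate equipos_j 0).foldl
    (fun acc ie => if ie.2 == nombre_e then acc ++ [ie.1] else acc) []
  posiciones_j.foldl (fun acc p => if indices.contains p then acc ++ [p] else acc) []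

-- ===== PRECONDITION & SPEC =====
def Spec_miequipo (posiciones_j : List Int) (equipos_j : List String) (nombre_e : String) (out : List Int) : Prop := out = miequipo_alt posiciones_j equipos_j nombre_e
instance (posiciones_j : List Int) (equipos_j : List String) (nombre_e : String) (out : List Int) : Decidable (Spec_miequipo posiciones_j equipos_j nombre_e out) := by unfold Spec_miequipo; infer_instance

-- ===== CLAIM (what is proved, stated in full; the proofs are below) =====
def Claim_equal_miequipo : Prop := ∀ (posiciones_j : List Int) (equipos_j : List String) (nombre_e : String), Dom_miequipo posiciones_j equipos_j nombre_e → Spec_miequipo posiciones_j equipos_j nombre_e (miequipo posiciones_j equipos_j nombre_e)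

-- ===== LEMMAS AND PROOFS =====

-- the common characterisation: p is kept iff it is an in-range index of a matching team
def pvGood (equipos_j : List String) (nombre_e : String) (p : Int) : Bool :=
  decide (0 ≤ p) && decide (p < (equipos_j.length : Int)) && (nombre_e == PySem.List.pyGetD equipos_j p "")

-- on a duplicate-free list, filtering for 'q e and e == p' yields [p] or []
theorem filter_eq_single {l : List Int} (h : l.Nodup) (q : Int → Bool) (p : Int) :
    l.filter (fun e => q e && e == p) = if p ∈ l ∧ q p = true then [p] else [] := by
  induction l with
  | nil => simp
  | cons a t ih =>
    simp only [List.nodup_cons] at h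
    by_cases hap : a = p
    · subst hap
      have ht : t.filter (fun e => q e && e == a) = [] := by
        apply List.filter_eq_nil_iff.mpr
        intro e he
        have : e ≠ a := fun hea => h.1 (hea ▸ he)
        simp [this]
      by_cases hq : q a = true <;> simp [hq, ht, h.1]
    · rw [List.filter_cons]
      have : (q a && a == p) = false := by simp [hap]
      simp only [this, ih h.2]
      by_cases hm : p ∈ t ∧ q p = true <;> simp [hm, Ne.symm hap]

theorem miequipo_eq_filter (posiciones_j : List Int) (equipos_j : List String) (nombre_e : String) :
    miequipo posiciones_j equipos_j nombre_e
      = posiciones_j.filter (pvGood equipos_j nombre_e) := by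
  unfold miequipo
  have inner : ∀ (acc : List Int) (p : Int),
      (PySem.List.pyRange 0 equipos_j.length 1).foldl (fun posiciones equipo =>
        if nombre_e == PySem.List.pyGetD equipos_j equipo "" && equipo == p then
          posiciones ++ [p] else posiciones) acc
      = acc ++ if pvGood equipos_j nombre_e p = true then [p] else [] := by
    intro acc p
    rw [PySem.List.foldl_append_if
      (p := fun equipo => nombre_e == PySem.List.pyGetD equipos_j equipo "" && equipo == p)
      (f := fun _ => p)]
    rw [filter_eq_single (PySem.List.nodup_pyRange_one 0 equipos_j.length)]
    congr 1
    by_cases hg : pvGood equipos_j nombre_e p = true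
    · have := hg
      simp only [pvGood, Bool.and_eq_true, decide_eq_true_eq] at this
      rw [if_pos ⟨PySem.List.mem_pyRange_one.mpr ⟨this.1.1, by simpa using this.1.2⟩, this.2⟩,
        if_pos hg]
      simp
    · have hnot : ¬(p ∈ PySem.List.pyRange 0 equipos_j.length ∧
          (nombre_e == PySem.List.pyGetD equipos_j p "") = true) := by
        intro ⟨hmem, hq⟩
        have hr := PySem.List.mem_pyRange_one.mp hmem
        exact hg (by simp [pvGood, hr.1, hq]; simpa using hr.2)
      rw [if_neg hnot, if_neg hg]
      simp
  calc posiciones_j.foldl (fun posiciones posicion =>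
        (PySem.List.pyRange 0 equipos_j.length 1).foldl (fun posiciones equipo =>
          if nombre_e == PySem.List.pyGetD equipos_j equipo "" && equipo == posicion then
            posiciones ++ [posicion] else posiciones) posiciones) []
      = posiciones_j.foldl (fun acc p =>
          acc ++ if pvGood equipos_j nombre_e p = true then [p] else []) [] := by
        apply PySem.List.foldl_congr_mem
        intro acc p _
        exact inner acc p
    _ = posiciones_j.filter (pvGood equipos_j nombre_e) := by
        rw [PySem.List.foldl_append_eq_flatMap]
        simp only [List.nil_append]
        induction posiciones_j with
        | nil => simp
        | cons a t ih => by_cases hg : pvGood equipos_j nombre_e a = true <;>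
            simp [hg, ih]

theorem miequipo_alt_eq_filter (posiciones_j : List Int) (equipos_j : List String) (nombre_e : String) :
    miequipo_alt posiciones_j equipos_j nombre_e
      = posiciones_j.filter (pvGood equipos_j nombre_e) := by
  unfold miequipo_alt
  rw [PySem.List.foldl_append_if (p := fun ie : Int × String => ie.2 == nombre_e) (f := (·.1)),
    PySem.List.foldl_append_if_eq_filter]
  simp only [List.nil_append]
  apply List.filter_congr
  intro p _
  have hmem : p ∈ ((PySem.List.enumerate equipos_j 0).filter (fun ie => ie.2 == nombre_e)).map (·.1)
      ↔ pvGood equipos_j nombre_e p = true := by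
    simp only [List.mem_map, List.mem_filter, PySem.List.mem_enumerate_iff, pvGood,
      Bool.and_eq_true, decide_eq_true_eq, beq_iff_eq]
    constructor
    · rintro ⟨⟨i, s⟩, ⟨⟨k, hk, hik⟩, hs⟩, hp⟩
      obtain ⟨rfl, rfl⟩ := Prod.mk.injEq .. ▸ hik
      simp only at hp hs
      subst hp
      refine ⟨⟨by omega, by omega⟩, ?_⟩
      rw [PySem.List.pyGetD_eq_getElem _ _ (by omega) (by omega)]
      have hk' : ((0 + (k : Int)).toNat) = k := by omega
      simp only [hk']
      simpa using hs.symm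
    · rintro ⟨⟨h0, hlt⟩, hname⟩
      refine ⟨(p, equipos_j[p.toNat]'(by omega)), ⟨⟨p.toNat, by omega, by simp [h0]⟩, ?_⟩, rfl⟩
      rw [PySem.List.pyGetD_eq_getElem _ _ h0 hlt] at hname
      simp [hname]
  rw [Bool.eq_iff_iff, List.contains_iff_mem]
  exact hmem

-- ===== VERDICT (by name: the statement is the Claim_ definition above) =====
theorem miequipo_spec : Claim_equal_miequipo := by
  intro posiciones_j equipos_j nombre_e _
  unfold Spec_miequipo
  rw [miequipo_eq_filter, miequipo_alt_eq_filter]
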